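-- pv_equiv track=rewrite | github.com/sakuya13/Study | python/textbook/chapter6_notes.py | basenum
-- ===== SOURCE A (Python) =====
-- def basenum(num, base):
--     '''test if all digits in num is strictly smaller than base'''
--     if type(num) != int or type(base) != int:
--         return False
--     if num < 0 or base <= 0 or base > 10:
--         return False
--     num_string = str(num)
--     for num in num_string:
--         if int(num) >= base:
--             return False
--     return True
-- ===== SOURCE B (Python) =====
-- def basenum(num, base):
--     '''test if all digits in num is strictly smaller than base'''
--     if type(num) != int or type(base) != int:
--         return False
--     if num < 0 or base <= 0 or base > 10:
--         return False
--     n = num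
--     while n > 0:
--         if n % 10 >= base:
--             return False
--         n //= 10
--     return True
-- ===== Notes on version B (the rewrite author's own statement) =====
-- stated objective: alternative
-- what changed: replaces the str(num) conversion and per-character int() parsing with direct arithmetic digit extraction (n % 10 / n //= 10 loop), no string involved
import Mathlib
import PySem

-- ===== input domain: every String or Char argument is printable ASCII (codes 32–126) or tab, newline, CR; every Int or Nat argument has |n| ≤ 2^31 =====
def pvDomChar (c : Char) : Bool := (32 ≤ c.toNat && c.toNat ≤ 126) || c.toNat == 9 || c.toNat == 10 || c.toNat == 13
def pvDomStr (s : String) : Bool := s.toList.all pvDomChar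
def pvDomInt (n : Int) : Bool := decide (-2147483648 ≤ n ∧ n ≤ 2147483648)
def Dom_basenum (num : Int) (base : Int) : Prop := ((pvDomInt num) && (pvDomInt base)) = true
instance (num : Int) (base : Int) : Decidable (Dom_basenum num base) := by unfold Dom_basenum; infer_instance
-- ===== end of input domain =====

-- B replaces A's string-based digit scan by arithmetic digit extraction (n % 10, n //= 10); same results, no speed claim.

-- ===== PORT A =====
-- loop 'for num in num_string: if int(num) >= base: return False'; the .getD 0 covers
-- the ValueError branch of int(), unreachable here because str of a nonnegative int is all digits
def basenumLoopA (cs : List Char) (base : Int) : Bool :=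
  match cs with
  | [] => true
  | c :: rest =>
      if (PySem.Int.ofChars? [c]).getD 0 ≥ base then false else basenumLoopA rest base

def basenum (num : Int) (base : Int) : Bool :=
  if num < 0 || base ≤ 0 || base > 10 then false
  else basenumLoopA (PySem.Int.toChars num) base

-- ===== PORT B =====
-- 'while n > 0: if n % 10 >= base: return False; n //= 10'
def basenumAltLoop (n : Int) (base : Int) : Bool :=
  if 0 < n then
    if PySem.Int.mod n 10 ≥ base then false
    else basenumAltLoop (PySem.Int.floordiv n 10) base
  else true
termination_by n.toNat
decreasing_by
  rw [PySem.Int.floordiv_eq_ediv_of_pos (by omega)]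
  omega

def basenum_alt (num : Int) (base : Int) : Bool :=
  if num < 0 || base ≤ 0 || base > 10 then false
  else basenumAltLoop num base

-- ===== PRECONDITION & SPEC =====
def Spec_basenum (num : Int) (base : Int) (out : Bool) : Prop := out = basenum_alt num base
instance (num : Int) (base : Int) (out : Bool) : Decidable (Spec_basenum num base out) := by unfold Spec_basenum; infer_instance

-- ===== CLAIM (what is proved, stated in full; the proofs are below) =====
def Claim_equal_basenum : Prop := ∀ (num : Int) (base : Int), Dom_basenum num base → Spec_basenum num base (basenum num base)

-- ===== LEMMAS AND PROOFS =====

-- the reversed digit list that Nat.toDigitsCore builds, low-order digit first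
def rdigs (n : Nat) : List Char :=
  Nat.digitChar (n % 10) :: (if h : n / 10 = 0 then [] else rdigs (n / 10))
termination_by n
decreasing_by
  exact Nat.div_lt_self (by omega) (by omega)

lemma toDigitsCore_eq_rdigs :
    ∀ (f n : Nat) (acc : List Char), n < f →
      Nat.toDigitsCore 10 f n acc = (rdigs n).reverse ++ acc := by
  intro f
  induction f with
  | zero => intro n acc h; omega
  | succ f ih =>
    intro n acc h
    rw [Nat.toDigitsCore, rdigs]
    by_cases h0 : n / 10 = 0
    · simp [h0]
    · rw [if_neg h0, dif_neg h0,
        ih (n / 10) (Nat.digitChar (n % 10) :: acc)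
          (by have := Nat.div_lt_self (by omega : 0 < n) (by omega : 1 < 10); omega)]
      simp

lemma loopA_eq_all (cs : List Char) (base : Int) :
    basenumLoopA cs base = cs.all (fun c => !((PySem.Int.ofChars? [c]).getD 0 ≥ base)) := by
  induction cs with
  | nil => rfl
  | cons c rest ih =>
    rw [basenumLoopA, List.all_cons, ih]
    by_cases h : (PySem.Int.ofChars? [c]).getD 0 ≥ base <;> simp [h]

lemma ofChars_digitChar (d : Nat) (hd : d < 10) :
    (PySem.Int.ofChars? [Nat.digitChar d]).getD 0 = (d : Int) := by
  interval_cases d <;> decide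

lemma rdigs_all_eq_altLoop (m : Nat) (base : Int) (hb : 1 ≤ base) :
    ((rdigs m).all (fun c => !((PySem.Int.ofChars? [c]).getD 0 ≥ base))) =
      basenumAltLoop (m : Int) base := by
  induction m using Nat.strong_induction_on with
  | _ m ih =>
    have hd := ofChars_digitChar (m % 10) (Nat.mod_lt _ (by omega))
    rw [rdigs]
    by_cases hm : 0 < m
    · have hmod : PySem.Int.mod (m : Int) 10 = ((m % 10 : Nat) : Int) := by
        exact_mod_cast PySem.Int.mod_natCast m 10
      have hdiv : PySem.Int.floordiv (m : Int) 10 = ((m / 10 : Nat) : Int) := by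
        exact_mod_cast PySem.Int.floordiv_natCast m 10
      rw [basenumAltLoop, if_pos (show (0:Int) < (m:Int) by exact_mod_cast hm), hmod, hdiv]
      by_cases h0 : m / 10 = 0
      · have halt0 : basenumAltLoop ((m / 10 : Nat) : Int) base = true := by
          rw [basenumAltLoop, if_neg (by simp [h0])]
        rw [dif_pos h0]
        by_cases hge : base ≤ ((m % 10 : Nat) : Int) <;>
          simp [hge, hd] <;>
          · intro _
            have hc : ((m : Int) / 10) = ((m / 10 : Nat) : Int) := by omega
            rw [hc]
            exact halt0
      · rw [dif_neg h0, List.all_cons, ih (m / 10) (Nat.div_lt_self hm (by omega))]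
        by_cases hge : base ≤ ((m % 10 : Nat) : Int) <;> simp [hge, hd]
    · have hm0 : m = 0 := by omega
      subst hm0
      rw [dif_pos (by decide), basenumAltLoop]
      simp [hd]
      omega

lemma toChars_nonneg (num : Int) (h : 0 ≤ num) :
    PySem.Int.toChars num = (rdigs num.toNat).reverse := by
  rw [PySem.Int.toChars, if_neg (by omega), Nat.toDigits,
    toDigitsCore_eq_rdigs (num.toNat + 1) num.toNat [] (by omega), List.append_nil]

-- ===== VERDICT (by name: the statement is the Claim_ definition above) =====
theorem basenum_spec : Claim_equal_basenum := by
  intro num base _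
  unfold Spec_basenum basenum basenum_alt
  by_cases hg : num < 0 || base ≤ 0 || base > 10
  · simp [hg]
  · rw [if_neg hg, if_neg hg]
    simp only [Bool.or_eq_true, decide_eq_true_eq, not_or] at hg
    rw [toChars_nonneg num (by omega), loopA_eq_all, List.all_reverse,
      rdigs_all_eq_altLoop num.toNat base (by omega),
      Int.toNat_of_nonneg (by omega)]
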